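-- pv_equiv track=rewrite | github.com/Glen02lee/PPS_solved | 3주차/1번째 제출/A154_이민석_20250121.py | calculate_min_cost
-- ===== SOURCE A (Python) =====
-- def calculate_min_cost(n, distances, prices):
--     min_cost = 0
--     min_price = prices[0]  # 첫 도시에서의 기름값
--
--     for i in range(n - 1):
--         min_cost += min_price * distances[i]  #최소 거리
--         if prices[i + 1] < min_price:
--             min_price = prices[i + 1]
--
--     return min_cost
-- ===== SOURCE B (Python) =====
-- def calculate_min_cost(n, distances, prices):
--     # Segment-jump greedy: the cheapest station so far stays in charge until a
--     # strictly cheaper one appears; buy all fuel for each such segment at once.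
--     total = 0
--     j = 0
--     while j < n - 1:
--         k = j + 1
--         while k < n - 1 and prices[k] >= prices[j]:
--             k += 1
--         total += prices[j] * sum(distances[j:k])
--         j = k
--     return total
-- ===== Notes on version B (the rewrite author's own statement) =====
-- stated objective: alternative
-- what changed: Replaces A's per-edge loop carrying a running minimum with a segment-jump greedy: an outer while advances from one price record to the next strictly-cheaper station (found by an inner scan) and buys the whole segment's fuel at once via prices[j]*sum(distances[j:k]).
import Mathlib
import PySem

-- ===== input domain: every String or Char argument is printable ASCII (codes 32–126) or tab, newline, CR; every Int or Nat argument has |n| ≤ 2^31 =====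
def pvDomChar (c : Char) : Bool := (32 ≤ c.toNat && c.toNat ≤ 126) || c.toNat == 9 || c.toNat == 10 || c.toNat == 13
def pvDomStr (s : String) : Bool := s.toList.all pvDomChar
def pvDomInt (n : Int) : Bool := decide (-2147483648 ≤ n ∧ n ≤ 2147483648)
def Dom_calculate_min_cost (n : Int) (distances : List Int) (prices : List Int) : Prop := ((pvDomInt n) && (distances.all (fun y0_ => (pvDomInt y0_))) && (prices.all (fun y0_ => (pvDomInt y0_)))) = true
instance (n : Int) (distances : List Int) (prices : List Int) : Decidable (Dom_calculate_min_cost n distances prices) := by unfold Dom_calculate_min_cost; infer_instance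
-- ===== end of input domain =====

-- B replaces A's per-edge running-minimum loop by a segment-jump greedy (outer while from
-- one price record to the next strictly cheaper station, buying each segment's fuel at once);
-- same asymptotic cost, no speed claim.

-- ===== PORT A =====
def calculate_min_cost (n : Int) (distances : List Int) (prices : List Int) : Int :=
  -- min_cost = 0; min_price = prices[0]; for i in range(n-1): …
  ((PySem.List.pyRange 0 (n - 1) 1).foldl
    (fun (s : Int × Int) i =>
      (s.1 + s.2 * PySem.List.pyGetD distances i 0,
       if PySem.List.pyGetD prices (i + 1) 0 < s.2 then PySem.List.pyGetD prices (i + 1) 0 else s.2))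
    (0, PySem.List.pyGetD prices 0 0)).1

-- ===== PORT B =====
-- inner while: k = j+1; while k < n-1 and prices[k] >= prices[j]: k += 1
def pvFindK (n : Int) (prices : List Int) (pj : Int) (k : Int) : Int :=
  if h : k < n - 1 ∧ pj ≤ PySem.List.pyGetD prices k 0 then
    pvFindK n prices pj (k + 1)
  else k
termination_by (n - 1 - k).toNat
decreasing_by omega

-- the inner while never moves k backwards (cited by pvSeg's termination proof)
theorem pvFindK_ge (n : Int) (prices : List Int) (pj k : Int) : k ≤ pvFindK n prices pj k := by
  fun_induction pvFindK with
  | case1 k h ih => omega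
  | case2 k h => omega

-- outer while: while j < n-1: k = …; total += prices[j]*sum(distances[j:k]); j = k
def pvSeg (n : Int) (distances prices : List Int) (j : Int) (total : Int) : Int :=
  if hj : j < n - 1 then
    let k := pvFindK n prices (PySem.List.pyGetD prices j 0) (j + 1)
    pvSeg n distances prices k
      (total + PySem.List.pyGetD prices j 0 * (PySem.List.slice distances (some j) (some k)).sum)
  else total
termination_by (n - 1 - j).toNat
decreasing_by
  have := pvFindK_ge n prices (PySem.List.pyGetD prices j 0) (j + 1)
  omega

def calculate_min_cost_alt (n : Int) (distances : List Int) (prices : List Int) : Int :=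
  pvSeg n distances prices 0 0

-- ===== PRECONDITION & SPEC =====
-- Pre_ excludes exactly the inputs on which the Python A raises IndexError:
-- prices must be nonempty (prices[0]) and the loop reads distances[0..n-2], prices[1..n-1].
def Pre_calculate_min_cost (n : Int) (distances : List Int) (prices : List Int) : Prop :=
  prices ≠ [] ∧ n - 1 ≤ (distances.length : Int) ∧ n ≤ (prices.length : Int)
instance (n : Int) (distances : List Int) (prices : List Int) : Decidable (Pre_calculate_min_cost n distances prices) := by unfold Pre_calculate_min_cost; infer_instance

def pvWitness_calculate_min_cost : Int × List Int × List Int := (4, [2, 3, 1], [5, 2, 4, 1])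

def Spec_calculate_min_cost (n : Int) (distances : List Int) (prices : List Int) (out : Int) : Prop := out = calculate_min_cost_alt n distances prices
instance (n : Int) (distances : List Int) (prices : List Int) (out : Int) : Decidable (Spec_calculate_min_cost n distances prices out) := by unfold Spec_calculate_min_cost; infer_instance

-- ===== CLAIM (what is proved, stated in full; the proofs are below) =====
def Claim_equal_calculate_min_cost : Prop := ∀ (n : Int) (distances : List Int) (prices : List Int), Dom_calculate_min_cost n distances prices → Pre_calculate_min_cost n distances prices → Spec_calculate_min_cost n distances prices (calculate_min_cost n distances prices)

-- ===== LEMMAS AND PROOFS =====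

-- the prefix minimum of prices (with Python's defaulted read, matching both ports' pyGetD)
def pvPM (prices : List Int) : Nat → Int
  | 0 => PySem.List.pyGetD prices 0 0
  | k + 1 => min (pvPM prices k) (PySem.List.pyGetD prices (k + 1 : Nat) 0)

-- A's loop over range(m), characterized: state after m steps
theorem pvA_loop (distances prices : List Int) (m : Nat) :
    (((List.range m).map (Int.ofNat)).foldl
      (fun (s : Int × Int) i =>
        (s.1 + s.2 * PySem.List.pyGetD distances i 0,
         if PySem.List.pyGetD prices (i + 1) 0 < s.2 then PySem.List.pyGetD prices (i + 1) 0 else s.2))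
      (0, PySem.List.pyGetD prices 0 0))
    = (((List.range m).map (fun k => pvPM prices k * PySem.List.pyGetD distances (k : Nat) 0)).sum,
       pvPM prices m) := by
  induction m with
  | zero => simp [pvPM]
  | succ m ih =>
    rw [List.range_succ, List.map_append, List.foldl_append, ih, List.map_append]
    simp only [List.map_cons, List.map_nil, List.foldl_cons, List.foldl_nil, List.sum_append,
      List.sum_cons, List.sum_nil, Int.ofNat_eq_natCast]
    rw [Prod.mk.injEq]
    refine ⟨by ring, ?_⟩
    rw [pvPM]
    have hc : ((m : Int) + 1) = ((m + 1 : Nat) : Int) := by push_cast; ring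
    rw [hc, min_def]
    split_ifs <;> omega

theorem pvRange_cast (a : Int) : PySem.List.pyRange 0 a 1 = (List.range a.toNat).map Int.ofNat := by
  rw [PySem.List.pyRange_one]
  simp [Int.ofNat_eq_natCast]

-- list-range sum = Finset.range sum
theorem pvSum_range (f : Nat → Int) (m : Nat) :
    ((List.range m).map f).sum = ∑ i ∈ Finset.range m, f i := by
  induction m with
  | zero => simp
  | succ m ih => rw [List.range_succ, Finset.sum_range_succ]; simp [ih]

-- sum of a drop/take window = defaulted-index sum over the interval (unconditional: past-the-end
-- positions contribute 0 on both sides)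
theorem pvSum_window (d : List Int) (a t : Nat) :
    ((d.drop a).take t).sum = ∑ i ∈ Finset.Ico a (a + t), d.getD i 0 := by
  induction t with
  | zero => simp
  | succ t ih =>
    rw [List.take_succ, List.sum_append, ih, show a + (t + 1) = (a + t) + 1 from rfl,
      Finset.sum_Ico_succ_top (by omega)]
    congr 1
    rw [List.getElem?_drop, List.getD_eq_getElem?_getD]
    cases h : d[a + t]? <;> simp [h]

-- what the inner while guarantees: result bounds, all skipped prices ≥ pj, stop price < pj
theorem pvFindK_le (n : Int) (prices : List Int) (pj k : Int) (hk : k ≤ n - 1) :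
    pvFindK n prices pj k ≤ n - 1 := by
  fun_induction pvFindK with
  | case1 k h ih => exact ih (by omega)
  | case2 k h => omega

theorem pvFindK_skip (n : Int) (prices : List Int) (pj k : Int) :
    ∀ i, k ≤ i → i < pvFindK n prices pj k → pj ≤ PySem.List.pyGetD prices i 0 := by
  fun_induction pvFindK with
  | case1 k h ih =>
    intro i hi1 hi2
    rcases eq_or_lt_of_le hi1 with rfl | hlt
    · exact h.2
    · exact ih i (by omega) hi2
  | case2 k h =>
    intro i hi1 hi2; omega

theorem pvFindK_stop (n : Int) (prices : List Int) (pj k : Int)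
    (h : pvFindK n prices pj k < n - 1) :
    PySem.List.pyGetD prices (pvFindK n prices pj k) 0 < pj := by
  fun_induction pvFindK with
  | case1 k h' ih => exact ih h
  | case2 k h' =>
    push_neg at h'
    exact lt_of_not_ge (fun hge => by have := h' h; omega)

-- main invariant: from any segment start j whose price is the running minimum,
-- pvSeg adds exactly the prefix-min × distance sum of the remaining edges
theorem pvSeg_eq (n : Int) (distances prices : List Int) :
    ∀ (j total : Int), 0 ≤ j →
      (j < n - 1 → pvPM prices j.toNat = PySem.List.pyGetD prices j 0) →
      pvSeg n distances prices j total
        = total + ∑ i ∈ Finset.Ico j.toNat (n - 1).toNat,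
            pvPM prices i * distances.getD i 0 := by
  intro j total
  induction j, total using pvSeg.induct n distances prices with
  | case1 j total hj k hk =>
    intro hj0 hpm
    rw [pvSeg]
    simp only [hj, dite_true]
    have hjt : (j.toNat : Int) = j := Int.toNat_of_nonneg hj0
    have hK1 : j + 1 ≤ k := pvFindK_ge n prices (PySem.List.pyGetD prices j 0) (j + 1)
    have hK2 : k ≤ n - 1 := pvFindK_le n prices (PySem.List.pyGetD prices j 0) (j + 1) (by omega)
    have hK0 : 0 ≤ k := by omega
    have hKt : (k.toNat : Int) = k := Int.toNat_of_nonneg hK0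
    -- every prefix minimum inside the segment equals the segment's start price
    have C1 : ∀ i : Nat, j.toNat ≤ i → i < k.toNat → pvPM prices i = PySem.List.pyGetD prices j 0 := by
      intro i
      induction i with
      | zero =>
        intro h1 h2
        have : j = 0 := by omega
        subst this
        simpa [pvPM] using hpm hj
      | succ i ih =>
        intro h1 h2
        rcases Nat.lt_or_ge i j.toNat with hcase | hcase
        · have : j.toNat = i + 1 := by omega
          have hji : j = ((i + 1 : Nat) : Int) := by omega
          rw [show (i + 1 : Nat) = j.toNat from this.symm]
          rw [hpm hj]
        · have hpmi : pvPM prices i = PySem.List.pyGetD prices j 0 := ih hcase (by omega)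
          have hge : PySem.List.pyGetD prices j 0 ≤ PySem.List.pyGetD prices ((i + 1 : Nat) : Int) 0 := by
            apply pvFindK_skip n prices (PySem.List.pyGetD prices j 0) (j + 1)
            · omega
            · omega
          rw [pvPM, hpmi, min_eq_left hge]
    -- if the outer loop continues, the new start's price is again the running minimum
    have hpm' : k < n - 1 → pvPM prices k.toNat = PySem.List.pyGetD prices k 0 := by
      intro hklt
      have hk1 : 1 ≤ k.toNat := by omega
      obtain ⟨t, ht⟩ : ∃ t, k.toNat = t + 1 := ⟨k.toNat - 1, by omega⟩
      have hstop : PySem.List.pyGetD prices k 0 < PySem.List.pyGetD prices j 0 :=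
        pvFindK_stop n prices (PySem.List.pyGetD prices j 0) (j + 1) hklt
      rw [ht, pvPM, C1 t (by omega) (by omega)]
      rw [show ((t + 1 : Nat) : Int) = k by omega]
      exact min_eq_right (le_of_lt hstop)
    rw [hk hK0 hpm']
    -- the slice sum is the defaulted-index sum over [j, k)
    have hslice : (PySem.List.slice distances (some j) (some k)).sum
        = ∑ i ∈ Finset.Ico j.toNat k.toNat, distances.getD i 0 := by
      rw [PySem.List.slice_toNat distances hj0 hK0, pvSum_window,
        show j.toNat + (k.toNat - j.toNat) = k.toNat by omega]
    rw [hslice]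
    rw [← Finset.sum_Ico_consecutive _ (show j.toNat ≤ k.toNat by omega)
      (show k.toNat ≤ (n - 1).toNat by omega)]
    have hseg : ∑ i ∈ Finset.Ico j.toNat k.toNat, pvPM prices i * distances.getD i 0
        = PySem.List.pyGetD prices j 0 * ∑ i ∈ Finset.Ico j.toNat k.toNat, distances.getD i 0 := by
      rw [Finset.mul_sum]
      apply Finset.sum_congr rfl
      intro i hi
      rw [Finset.mem_Ico] at hi
      rw [C1 i hi.1 hi.2]
    rw [hseg]
    ring
  | case2 j total hj =>
    intro hj0 hpm
    rw [pvSeg]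
    simp only [hj, dite_false]
    rw [Finset.Ico_eq_empty (by omega : ¬ j.toNat < (n - 1).toNat)]
    simp

-- ===== VERDICT (by name: the statement is the Claim_ definition above) =====
theorem calculate_min_cost_spec : Claim_equal_calculate_min_cost := by
  intro n distances prices _ _
  unfold Spec_calculate_min_cost calculate_min_cost calculate_min_cost_alt
  rw [pvRange_cast (n - 1), pvA_loop, pvSeg_eq n distances prices 0 0 le_rfl
    (fun _ => by simp [pvPM])]
  rw [pvSum_range]
  simp only [Int.toNat_zero, zero_add, Finset.range_eq_Ico]
  exact Finset.sum_congr rfl (fun i _ => by rw [PySem.List.pyGetD_natCast])
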